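-- pv_equiv track=rewrite | github.com/Oneflow-Inc/oneflow | python/oneflow/fx/passes/quantization.py | get_current_module_space
-- ===== SOURCE A (Python) =====
-- def get_current_module_space(mod: str):
--     x = mod.split(".")
--     x_len = len(x)
--     y = ""
--     for _ in range(x_len - 1):
--         y += x[_]
--         if _ < x_len - 2:
--             y += "."
--     return y
-- ===== SOURCE B (Python) =====
-- def get_current_module_space(mod: str):
--     # prefix before the LAST dot, located directly; "" when there is no dot
--     return mod.rpartition(".")[0]
-- ===== Notes on version B (the rewrite author's own statement) =====
-- stated objective: simpler
-- what changed: Instead of splitting the string into all dot-separated tokens and re-joining all but the last in an index loop, B locates the last '.' directly with rpartition and returns the prefix before it (empty when there is no dot).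
import Mathlib
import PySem

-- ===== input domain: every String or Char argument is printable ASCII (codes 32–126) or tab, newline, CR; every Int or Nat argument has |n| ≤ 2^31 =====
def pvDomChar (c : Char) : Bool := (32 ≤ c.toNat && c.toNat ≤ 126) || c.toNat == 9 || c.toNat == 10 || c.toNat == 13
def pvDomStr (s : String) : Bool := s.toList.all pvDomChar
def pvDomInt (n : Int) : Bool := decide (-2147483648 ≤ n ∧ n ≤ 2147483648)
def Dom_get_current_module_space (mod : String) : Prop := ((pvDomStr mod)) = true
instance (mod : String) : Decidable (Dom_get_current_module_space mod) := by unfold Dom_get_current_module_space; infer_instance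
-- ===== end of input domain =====

-- B replaces A's split-into-tokens-and-rejoin index loop by locating the last '.' directly
-- (str.rpartition) and returning the prefix before it; objective: simpler.

-- ===== PORT A =====
def get_current_module_space (mod : String) : String :=
  let x := PySem.Chars.splitOn mod.toList ['.']        -- mod.split(".")  (non-empty literal separator)
  let x_len : Int := PySem.List.len x
  let y := (PySem.List.pyRange 0 (x_len - 1) 1).foldl
    (fun y i =>
      let y := y ++ PySem.List.pyGetD x i []           -- y += x[_]  (index always in range here)
      if i < x_len - 2 then y ++ ['.'] else y)         -- if _ < x_len - 2: y += "."
    []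
  String.ofList y

-- ===== PORT B =====
-- mod.rpartition(".")[0], ported by hand (exact): scan from the right to the last '.',
-- the head component is everything before it; "" when there is no '.'.
def get_current_module_space_alt (mod : String) : String :=
  match mod.toList.reverse.dropWhile (fun c => c ≠ '.') with
  | [] => ""
  | _ :: rest => String.ofList rest.reverse

-- ===== PRECONDITION & SPEC =====
def Spec_get_current_module_space (mod : String) (out : String) : Prop := out = get_current_module_space_alt mod
instance (mod : String) (out : String) : Decidable (Spec_get_current_module_space mod out) := by unfold Spec_get_current_module_space; infer_instance

-- ===== CLAIM (what is proved, stated in full; the proofs are below) =====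
def Claim_equal_get_current_module_space : Prop := ∀ (mod : String), Dom_get_current_module_space mod → Spec_get_current_module_space mod (get_current_module_space mod)

-- ===== LEMMAS AND PROOFS =====

-- A simple structural model of mod.split(".") (single-character separator).
def split1 : List Char → List (List Char)
  | [] => [[]]
  | c :: cs => if c = '.' then [] :: split1 cs else ((c :: (split1 cs).headI) :: (split1 cs).tail)

-- The common value of both programs: chars up to (excluding) the last '.'; [] if no '.'.
def fB : List Char → List Char
  | [] => []
  | c :: cs => if '.' ∈ cs then c :: fB cs else []

-- A's loop as a flatMap over token indices (join of all but the last token with '.').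
def aj (x : List (List Char)) : List Char :=
  (List.range (x.length - 1)).flatMap
    (fun k => x.getD k [] ++ if (k : Int) < (x.length : Int) - 2 then ['.'] else [])

theorem split1_ne_nil (cs : List Char) : split1 cs ≠ [] := by
  cases cs with
  | nil => simp [split1]
  | cons c cs => by_cases h : c = '.' <;> simp [split1, h]

theorem split1_no_dot (cs : List Char) (h : '.' ∉ cs) : split1 cs = [cs] := by
  induction cs with
  | nil => rfl
  | cons c cs ih =>
    have hc : c ≠ '.' := by rintro rfl; exact h (List.mem_cons_self ..)
    have ht : '.' ∉ cs := fun hm => h (List.mem_cons_of_mem _ hm)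
    simp [split1, hc, ih ht]

theorem two_le_split1_length (cs : List Char) (h : '.' ∈ cs) : 2 ≤ (split1 cs).length := by
  induction cs with
  | nil => cases h
  | cons c cs ih =>
    by_cases hc : c = '.'
    · obtain ⟨a, t, he⟩ : ∃ a t, split1 cs = a :: t := by
        cases hs : split1 cs with
        | nil => exact absurd hs (split1_ne_nil cs)
        | cons a t => exact ⟨a, t, rfl⟩
      simp [split1, hc, he]
    · have hm : '.' ∈ cs := by cases h with
        | head => exact absurd rfl hc
        | tail _ hm => exact hm
      have h2 := ih hm
      obtain ⟨a, t, he⟩ : ∃ a t, split1 cs = a :: t := by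
        cases hs : split1 cs with
        | nil => exact absurd hs (split1_ne_nil cs)
        | cons a t => exact ⟨a, t, rfl⟩
      simp [split1, hc, he]
      simp [he] at h2
      omega

theorem go_eq (cs : List Char) : ∀ (fuel : Nat) (cur : List Char) (acc : List (List Char)),
    cs.length ≤ fuel →
    PySem.Chars.splitOn.go ['.'] fuel cs cur acc
      = acc.reverse ++ (split1 cs).modifyHead (cur.reverse ++ ·) := by
  induction cs with
  | nil =>
    intro fuel cur acc _
    cases fuel <;> simp [PySem.Chars.splitOn.go, split1]
  | cons c cs ih =>
    intro fuel cur acc hf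
    cases fuel with
    | zero => simp at hf
    | succ f =>
      have hf' : cs.length ≤ f := by simp at hf; omega
      by_cases hc : c = '.'
      · subst hc
        have hpre : List.isPrefixOf ['.'] ('.' :: cs) = true := by simp [List.isPrefixOf]
        rw [PySem.Chars.splitOn.go, if_pos hpre]
        simp only [List.length_cons, List.length_nil, List.drop_succ_cons, List.drop_zero]
        rw [ih f [] (cur.reverse :: acc) hf']
        obtain ⟨a, t, he⟩ : ∃ a t, split1 cs = a :: t := by
          cases hs : split1 cs with
          | nil => exact absurd hs (split1_ne_nil cs)
          | cons a t => exact ⟨a, t, rfl⟩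
        simp [split1, he]
      · have hpre : List.isPrefixOf ['.'] (c :: cs) = false := by
          simp [List.isPrefixOf]; exact fun h => absurd h.symm hc
        rw [PySem.Chars.splitOn.go, if_neg (by simp [hpre])]
        rw [ih f (c :: cur) acc hf']
        obtain ⟨a, t, he⟩ : ∃ a t, split1 cs = a :: t := by
          cases hs : split1 cs with
          | nil => exact absurd hs (split1_ne_nil cs)
          | cons a t => exact ⟨a, t, rfl⟩
        simp [split1, hc, he]

theorem splitOn_eq_split1 (cs : List Char) : PySem.Chars.splitOn cs ['.'] = split1 cs := by
  unfold PySem.Chars.splitOn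
  rw [go_eq cs (cs.length + 1) [] [] (by omega)]
  obtain ⟨a, t, he⟩ : ∃ a t, split1 cs = a :: t := by
    cases hs : split1 cs with
    | nil => exact absurd hs (split1_ne_nil cs)
    | cons a t => exact ⟨a, t, rfl⟩
  simp [he]

theorem aj_cons (t : List Char) (rest : List (List Char)) (h : rest ≠ []) :
    aj (t :: rest) = (t ++ if 2 ≤ rest.length then ['.'] else []) ++ aj rest := by
  obtain ⟨m, hm⟩ : ∃ m, rest.length = m + 1 := by
    cases rest with
    | nil => exact absurd rfl h
    | cons a t => exact ⟨t.length, rfl⟩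
  unfold aj
  simp only [List.length_cons, hm]
  have hr : (m + 1 + 1) - 1 = m + 1 := by omega
  rw [hr, List.range_succ_eq_map]
  rw [List.flatMap_cons, List.flatMap_map]
  congr 1
  · simp only [List.getD_cons_zero]
    congr 1
    by_cases h2 : 1 ≤ m
    · rw [if_pos (by push_cast; omega), if_pos (by omega)]
    · rw [if_neg (by push_cast; omega), if_neg (by omega)]
  · have hfun : ∀ k : Nat,
        ((t :: rest).getD (Nat.succ k) [] ++
          if ((Nat.succ k : Nat) : Int) < ((m + 1 + 1 : Nat) : Int) - 2 then ['.'] else [])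
        = (rest.getD k [] ++ if ((k : Nat) : Int) < ((m + 1 : Nat) : Int) - 2 then ['.'] else []) := by
      intro k
      simp only [List.getD_cons_succ]
      congr 1
      by_cases hk : (k : Int) < (m : Int) - 1
      · rw [if_pos (by push_cast; omega), if_pos (by push_cast; omega)]
      · rw [if_neg (by push_cast; omega), if_neg (by push_cast; omega)]
    exact List.flatMap_congr (fun k _ => hfun k)

theorem aj_split1 (cs : List Char) : aj (split1 cs) = fB cs := by
  induction cs with
  | nil => rfl
  | cons c cs ih =>
    by_cases hc : c = '.'
    · subst hc
      have hA : split1 ('.' :: cs) = [] :: split1 cs := by simp [split1]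
      rw [hA, aj_cons [] (split1 cs) (split1_ne_nil cs)]
      by_cases hd : '.' ∈ cs
      · rw [if_pos (two_le_split1_length cs hd), ih]
        simp [fB, hd]
      · rw [split1_no_dot cs hd]
        simp [aj, fB, hd]
    · obtain ⟨a, t, he⟩ : ∃ a t, split1 cs = a :: t := by
        cases hs : split1 cs with
        | nil => exact absurd hs (split1_ne_nil cs)
        | cons a t => exact ⟨a, t, rfl⟩
      have hA : split1 (c :: cs) = (c :: a) :: t := by simp [split1, hc, he]
      by_cases hd : '.' ∈ cs
      · have ht : t ≠ [] := by
          have h2 := two_le_split1_length cs hd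
          rw [he] at h2; simp at h2
          intro h0; rw [h0] at h2; simp at h2
        rw [hA, aj_cons (c :: a) t ht]
        rw [he, aj_cons a t ht] at ih
        simp only [fB, hd, if_pos]
        rw [← ih]
        simp
      · have hS : split1 cs = [cs] := split1_no_dot cs hd
        rw [he] at hS
        cases hS
        rw [hA]
        simp [aj, fB, hd]

theorem alt_chars (cs : List Char) :
    (match cs.reverse.dropWhile (fun c => c ≠ '.') with
      | [] => ([] : List Char)
      | _ :: rest => rest.reverse) = fB cs := by
  induction cs with
  | nil => rfl
  | cons c cs ih =>
    simp only [List.reverse_cons, List.dropWhile_append]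
    by_cases hd : '.' ∈ cs
    · have hne : cs.reverse.dropWhile (fun c => c ≠ '.') ≠ [] := by
        rw [Ne, List.dropWhile_eq_nil_iff]
        intro hall
        have := hall '.' (by simp [hd])
        simp at this
      cases hw : cs.reverse.dropWhile (fun c => c ≠ '.') with
      | nil => exact absurd hw hne
      | cons d r =>
        rw [hw] at ih
        rw [if_neg (by simp)]
        simp only [List.cons_append]
        simp only [fB, hd, if_pos]
        simp at ih ⊢
        exact ih
    · have hnil : cs.reverse.dropWhile (fun c => c ≠ '.') = [] := by
        rw [List.dropWhile_eq_nil_iff]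
        intro x hx
        simp only [List.mem_reverse] at hx
        simp only [decide_eq_true_eq]
        rintro rfl; exact hd hx
      rw [hnil]
      simp only [List.isEmpty_nil, reduceIte]
      by_cases hc : c = '.'
      · subst hc
        simp [List.dropWhile, fB, hd]
      · simp [List.dropWhile, hc, fB, hd]

theorem alt_eq (mod : String) :
    get_current_module_space_alt mod = String.ofList (fB mod.toList) := by
  unfold get_current_module_space_alt
  rw [← alt_chars mod.toList]
  cases mod.toList.reverse.dropWhile (fun c => c ≠ '.') <;> rfl

theorem A_eq (mod : String) :
    get_current_module_space mod = String.ofList (aj (split1 mod.toList)) := by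
  unfold get_current_module_space
  rw [splitOn_eq_split1]
  set x := split1 mod.toList with hx
  show String.ofList ((PySem.List.pyRange 0 (PySem.List.len x - 1) 1).foldl
      (fun y i =>
        let y := y ++ PySem.List.pyGetD x i []
        if i < PySem.List.len x - 2 then y ++ ['.'] else y) []) = String.ofList (aj x)
  have hlen : 1 ≤ x.length := by
    cases hs : x with
    | nil => exact absurd (hx ▸ hs) (split1_ne_nil mod.toList)
    | cons a t => simp
  have hbody : (fun (y : List Char) (i : Int) =>
        let y := y ++ PySem.List.pyGetD x i []
        if i < PySem.List.len x - 2 then y ++ ['.'] else y)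
      = (fun (y : List Char) (i : Int) =>
        y ++ (PySem.List.pyGetD x i [] ++ if i < PySem.List.len x - 2 then ['.'] else [])) := by
    funext y i
    by_cases h : i < PySem.List.len x - 2 <;>
      simp only [PySem.List.len_eq] at h <;> simp [PySem.List.len_eq, h]
  rw [hbody, PySem.List.foldl_append_eq_flatMap]
  have hcast : PySem.List.len x - 1 = ((x.length - 1 : Nat) : Int) := by
    simp only [PySem.List.len_eq]; omega
  rw [hcast, PySem.List.pyRange_zero_natCast, List.flatMap_map]
  unfold aj
  simp only [List.nil_append]
  refine congrArg String.ofList (List.flatMap_congr (fun k _ => ?_))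
  rw [PySem.List.pyGetD_natCast]
  simp [PySem.List.len_eq]

-- ===== VERDICT (by name: the statement is the Claim_ definition above) =====
theorem get_current_module_space_spec : Claim_equal_get_current_module_space := by
  intro mod _
  unfold Spec_get_current_module_space
  rw [A_eq, aj_split1, alt_eq]
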